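-- pv_equiv track=rewrite | github.com/thealper2/codewars-solutions | 7-kyu/simple_fun_334_two_beggars_and_gold.py | distribution_of
-- ===== SOURCE A (Python) =====
-- def distribution_of(golds):
--     A, B = 0, 0
--     turn = True
--
--     while golds:
--         left, right = golds[0], golds[-1]
--
--         if left >= right:
--             taken = golds.pop(0)
--         else:
--             taken = golds.pop(-1)
--
--         if turn:
--             A += taken
--         else:
--             B += taken
--
--         turn = not turn
--
--     return [A, B]
-- ===== SOURCE B (Python) =====
-- def distribution_of(golds):
--     # Two index pointers over the list; no mutation of golds (A empties its argument).
--     i, j = 0, len(golds)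
--     totals = [0, 0]
--     t = 0
--     while i < j:
--         if golds[i] >= golds[j - 1]:
--             taken = golds[i]
--             i += 1
--         else:
--             taken = golds[j - 1]
--             j -= 1
--         totals[t] += taken
--         t ^= 1
--     return totals
-- ===== Notes on version B (the rewrite author's own statement) =====
-- stated objective: alternative
-- what changed: Replaces A's destructive loop that pops the larger end off a shrinking list with a two-index-pointer scan over the untouched list (B also does not mutate its argument, while A empties it).
import Mathlib
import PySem

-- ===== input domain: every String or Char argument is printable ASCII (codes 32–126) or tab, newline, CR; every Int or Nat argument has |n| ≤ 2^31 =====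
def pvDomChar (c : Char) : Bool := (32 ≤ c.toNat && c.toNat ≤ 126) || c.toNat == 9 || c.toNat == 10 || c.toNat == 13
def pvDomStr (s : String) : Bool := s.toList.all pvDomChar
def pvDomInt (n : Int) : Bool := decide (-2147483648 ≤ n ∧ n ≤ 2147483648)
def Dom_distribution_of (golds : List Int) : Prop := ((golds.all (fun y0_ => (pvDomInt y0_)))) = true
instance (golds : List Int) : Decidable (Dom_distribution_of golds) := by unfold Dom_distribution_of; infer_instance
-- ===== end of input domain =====

-- B replaces A's destructive pop(0)/pop(-1) loop by two index pointers over the untouched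
-- list; equivalence is about the RETURN value only: A empties its argument in place, B does not mutate it.

-- ===== PORT A =====
-- A's while loop: golds shrinks by popping the larger end; A/B totals, alternating turn.
def pvALoop (g : List Int) (a b : Int) (t : Bool) : List Int :=
  match g with
  | [] => [a, b]
  | x :: xs =>
    if x ≥ (x :: xs).getLast (by simp) then
      -- taken = golds.pop(0)
      if t then pvALoop xs (a + x) b (!t) else pvALoop xs a (b + x) (!t)
    else
      -- taken = golds.pop(-1)
      if t then pvALoop (x :: xs).dropLast (a + (x :: xs).getLast (by simp)) b (!t)
      else pvALoop (x :: xs).dropLast a (b + (x :: xs).getLast (by simp)) (!t)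
termination_by g.length
decreasing_by all_goals simp [List.length_dropLast]

def distribution_of (golds : List Int) : List Int := pvALoop golds 0 0 true

-- ===== PORT B =====
-- B's while loop: indices i < j over the untouched list (all indexing in range, so getD is exact).
def pvBLoop (g : List Int) (i j : Nat) (a b : Int) (t : Bool) : List Int :=
  if _h : i < j then
    if g.getD i 0 ≥ g.getD (j - 1) 0 then
      if t then pvBLoop g (i + 1) j (a + g.getD i 0) b (!t)
      else pvBLoop g (i + 1) j a (b + g.getD i 0) (!t)
    else
      if t then pvBLoop g i (j - 1) (a + g.getD (j - 1) 0) b (!t)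
      else pvBLoop g i (j - 1) a (b + g.getD (j - 1) 0) (!t)
  else [a, b]
termination_by j - i
decreasing_by all_goals omega

def distribution_of_alt (golds : List Int) : List Int := pvBLoop golds 0 golds.length 0 0 true

-- ===== PRECONDITION & SPEC =====
def Spec_distribution_of (golds : List Int) (out : List Int) : Prop := out = distribution_of_alt golds
instance (golds : List Int) (out : List Int) : Decidable (Spec_distribution_of golds out) := by unfold Spec_distribution_of; infer_instance

-- ===== CLAIM (what is proved, stated in full; the proofs are below) =====
def Claim_equal_distribution_of : Prop := ∀ (golds : List Int), Dom_distribution_of golds → Spec_distribution_of golds (distribution_of golds)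

-- ===== LEMMAS AND PROOFS =====

-- B's index loop on [i, j) computes A's loop on the corresponding segment of g.
theorem pvBLoop_eq_pvALoop (g : List Int) (n i j : Nat) (hn : j - i = n) (hj : j ≤ g.length)
    (a b : Int) (t : Bool) :
    pvBLoop g i j a b t = pvALoop ((g.drop i).take (j - i)) a b t := by
  induction n generalizing i j a b t with
  | zero =>
    rw [pvBLoop, pvALoop.eq_def]
    simp [hn, Nat.not_lt.mpr (Nat.le_of_sub_eq_zero hn)]
  | succ n ih =>
    have hij : i < j := by omega
    have hi : i < g.length := by omega
    have hj1 : j - 1 < g.length := by omega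
    have hseg : (g.drop i).take (j - i) = g[i] :: ((g.drop (i + 1)).take (j - (i + 1))) := by
      rw [List.drop_eq_getElem_cons hi]
      have : j - i = (j - (i + 1)) + 1 := by omega
      rw [this, List.take_succ_cons]
    have hlen : ((g.drop i).take (j - i)).length = j - i := by
      simp; omega
    have hgetElem : ∀ (h : 0 < ((g.drop i).take (j - i)).length),
        ((g.drop i).take (j - i)).getLast (by
          intro hc; rw [hc] at h; simp at h) = g[j - 1] := by
      intro h
      rw [List.getLast_eq_getElem]
      simp only [hlen]
      rw [List.getElem_take, List.getElem_drop]
      congr 1; omega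
    have hdl : ((g.drop i).take (j - i)).dropLast = (g.drop i).take (j - 1 - i) := by
      rw [List.dropLast_eq_take, hlen, List.take_take]
      congr 1; omega
    have hGi : g.getD i 0 = g[i] := List.getD_eq_getElem g 0 hi
    have hGj : g.getD (j - 1) 0 = g[j - 1] := List.getD_eq_getElem g 0 hj1
    rw [pvBLoop, dif_pos hij, hGi, hGj]
    rw [hseg, pvALoop]
    have hlast : (g[i] :: ((g.drop (i + 1)).take (j - (i + 1)))).getLast (by simp) = g[j - 1] := by
      simp only [← hseg]; exact hgetElem (by rw [hlen]; omega)
    rw [hlast]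
    have hdl' : (g[i] :: ((g.drop (i + 1)).take (j - (i + 1)))).dropLast
        = (g.drop i).take (j - 1 - i) := by rw [← hseg]; exact hdl
    split_ifs with hcmp ht ht
    · rw [ih (i + 1) j (by omega) hj]
    · rw [ih (i + 1) j (by omega) hj]
    · rw [hdl', ih i (j - 1) (by omega) (by omega)]
    · rw [hdl', ih i (j - 1) (by omega) (by omega)]

-- ===== VERDICT (by name: the statement is the Claim_ definition above) =====
theorem distribution_of_spec : Claim_equal_distribution_of := by
  intro golds _
  unfold Spec_distribution_of distribution_of distribution_of_alt
  rw [pvBLoop_eq_pvALoop golds golds.length 0 golds.length rfl le_rfl]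
  simp
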